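-- pv_equiv track=rewrite | github.com/Chandru030206/gestureX | GestureX/ml_training/realtime_inference.py | predict_word
-- ===== SOURCE A (Python) =====
-- WORD_VOCAB = [
--     "HELLO","HELP","HAPPY","HOME","HAVE","HEAR","HURRY",
--     "PLEASE","PAIN","PATIENT","PLAY",
--     "STOP","SORRY","SAFE","SEE","SCHOOL","SPEAK",
--     "THANK","THINK","TIME","TODAY","TOMORROW",
--     "GOOD","GO","GOODBYE",
--     "YES","YOU","YOUR",
--     "NO","NAME","NEED","NICE","NOW",
--     "MORE","ME","MY","MOTHER",
--     "WATER","WANT","WAIT","WORK","WHERE","WHEN","WHY","WHO","WHAT",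
--     "LOVE","LEARN","LIKE",
--     "FAMILY","FATHER","FRIEND","FEEL","FOOD",
--     "BAD","BYE","BETTER",
--     "DANGER","DOCTOR","DRINK",
--     "EMERGENCY","EAT","EASY",
--     "KNOW","CALL",
-- ]
--
-- def predict_word(prefix: str) -> str:
--     if len(prefix) < 2:
--         return prefix
--     matches = [w for w in WORD_VOCAB if w.startswith(prefix.upper())]
--     if matches:
--         matches.sort(key=len)
--         return matches[0]
--     return prefix
-- ===== SOURCE B (Python) =====
-- # Vocabulary kept as one whitespace-separated string, split once at import;
-- # lookup is a single pass keeping the shortest match so far (strict '<'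
-- # preserves the first-in-vocab tie-break, like A's stable sort).
-- _VOCAB_TEXT = (
--     "HELLO HELP HAPPY HOME HAVE HEAR HURRY "
--     "PLEASE PAIN PATIENT PLAY "
--     "STOP SORRY SAFE SEE SCHOOL SPEAK "
--     "THANK THINK TIME TODAY TOMORROW "
--     "GOOD GO GOODBYE "
--     "YES YOU YOUR "
--     "NO NAME NEED NICE NOW "
--     "MORE ME MY MOTHER "
--     "WATER WANT WAIT WORK WHERE WHEN WHY WHO WHAT "
--     "LOVE LEARN LIKE "
--     "FAMILY FATHER FRIEND FEEL FOOD "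
--     "BAD BYE BETTER "
--     "DANGER DOCTOR DRINK "
--     "EMERGENCY EAT EASY "
--     "KNOW CALL"
-- )
-- _WORDS = _VOCAB_TEXT.split()
--
-- def predict_word(prefix: str) -> str:
--     if len(prefix) < 2:
--         return prefix
--     up = prefix.upper()
--     best = None
--     for w in _WORDS:
--         if w.startswith(up):
--             if best is None or len(w) < len(best):
--                 best = w
--     return best if best is not None else prefix
-- ===== Notes on version B (the rewrite author's own statement) =====
-- stated objective: faster
-- what changed: Stores the vocabulary as one whitespace-separated string split once at import, and replaces the filter-into-list-plus-sort-by-length with a single linear scan that keeps the first strictly-shortest match so far, never building or sorting an intermediate list.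
import Mathlib
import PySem

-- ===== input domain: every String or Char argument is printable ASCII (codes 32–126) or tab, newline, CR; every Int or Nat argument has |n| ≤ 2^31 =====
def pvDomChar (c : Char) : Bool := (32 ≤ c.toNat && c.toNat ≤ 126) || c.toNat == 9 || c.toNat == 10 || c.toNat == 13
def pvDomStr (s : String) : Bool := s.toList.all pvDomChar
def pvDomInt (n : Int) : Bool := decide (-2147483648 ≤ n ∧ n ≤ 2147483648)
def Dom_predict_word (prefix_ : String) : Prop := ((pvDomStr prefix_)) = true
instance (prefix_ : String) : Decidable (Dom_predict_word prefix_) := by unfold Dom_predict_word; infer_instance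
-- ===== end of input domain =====

-- B keeps the vocabulary as one string split once and replaces filter-then-sort with a single scan keeping the first shortest match so far (no intermediate list, no sort).

-- ===== PORT A =====
def WORD_VOCAB : List String := [
  "HELLO","HELP","HAPPY","HOME","HAVE","HEAR","HURRY",
  "PLEASE","PAIN","PATIENT","PLAY",
  "STOP","SORRY","SAFE","SEE","SCHOOL","SPEAK",
  "THANK","THINK","TIME","TODAY","TOMORROW",
  "GOOD","GO","GOODBYE",
  "YES","YOU","YOUR",
  "NO","NAME","NEED","NICE","NOW",
  "MORE","ME","MY","MOTHER",
  "WATER","WANT","WAIT","WORK","WHERE","WHEN","WHY","WHO","WHAT",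
  "LOVE","LEARN","LIKE",
  "FAMILY","FATHER","FRIEND","FEEL","FOOD",
  "BAD","BYE","BETTER",
  "DANGER","DOCTOR","DRINK",
  "EMERGENCY","EAT","EASY",
  "KNOW","CALL"]

def predict_word (prefix_ : String) : String :=
  if PySem.Str.len prefix_ < 2 then prefix_
  else
    -- matches = [w for w in WORD_VOCAB if w.startswith(prefix.upper())]
    if WORD_VOCAB.filter (fun w => PySem.Str.startswith w (PySem.Str.upper prefix_)) ≠ [] then
      -- matches.sort(key=len); return matches[0]  (index 0 of a nonempty list cannot fail)
      match PySem.List.pyGet? (PySem.List.sorted (WORD_VOCAB.filter (fun w => PySem.Str.startswith w (PySem.Str.upper prefix_))) (fun w => PySem.Str.len w) false) 0 with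
      | some w => w
      | none => prefix_
    else prefix_

-- ===== PORT B =====
def pwVocabText : String :=
  "HELLO HELP HAPPY HOME HAVE HEAR HURRY PLEASE PAIN PATIENT PLAY STOP SORRY SAFE SEE SCHOOL SPEAK THANK THINK TIME TODAY TOMORROW GOOD GO GOODBYE YES YOU YOUR NO NAME NEED NICE NOW MORE ME MY MOTHER WATER WANT WAIT WORK WHERE WHEN WHY WHO WHAT LOVE LEARN LIKE FAMILY FATHER FRIEND FEEL FOOD BAD BYE BETTER DANGER DOCTOR DRINK EMERGENCY EAT EASY KNOW CALL"

-- _WORDS = _VOCAB_TEXT.split()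
def pwWords : List String := PySem.Str.split₀ pwVocabText

-- the 'for w in _WORDS' loop of Source B, carrying 'best'
def pwBest (up : String) (best : Option String) : List String → Option String
  | [] => best
  | w :: ws =>
    if PySem.Str.startswith w up then
      match best with
      | none => pwBest up (some w) ws
      | some b => if PySem.Str.len w < PySem.Str.len b then pwBest up (some w) ws else pwBest up best ws
    else pwBest up best ws

def predict_word_alt (prefix_ : String) : String :=
  if PySem.Str.len prefix_ < 2 then prefix_
  else
    match pwBest (PySem.Str.upper prefix_) none pwWords with
    | some b => b
    | none => prefix_

-- ===== PRECONDITION & SPEC =====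
def Spec_predict_word (prefix_ : String) (out : String) : Prop := out = predict_word_alt prefix_
instance (prefix_ : String) (out : String) : Decidable (Spec_predict_word prefix_ out) := by unfold Spec_predict_word; infer_instance

-- ===== CLAIM (what is proved, stated in full; the proofs are below) =====
def Claim_equal_predict_word : Prop := ∀ (prefix_ : String), Dom_predict_word prefix_ → Spec_predict_word prefix_ (predict_word prefix_)

-- ===== LEMMAS AND PROOFS =====

-- B's word list (the split of the one-string vocabulary) is exactly A's literal list.
set_option maxRecDepth 20000 in
theorem pwWords_eq : pwWords = WORD_VOCAB := by decide

/-- The step B's loop performs once the startswith test has passed. -/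
def pwStep (b : Option String) (w : String) : Option String :=
  match b with
  | none => some w
  | some bb => if PySem.Str.len w < PySem.Str.len bb then some w else some bb

/-- 'first minimal-length element' as a fold over the already-filtered list. -/
def minFold (best : Option String) (M : List String) : Option String :=
  M.foldl pwStep best

theorem minFold_append (best : Option String) (xs : List String) (x : String) :
    minFold best (xs ++ [x]) = pwStep (minFold best xs) x := by
  simp [minFold]

theorem pwBest_eq_minFold (up : String) (L : List String) (best : Option String) :
    pwBest up best L = minFold best (L.filter (fun w => PySem.Str.startswith w up)) := by
  induction L generalizing best with
  | nil => simp [pwBest, minFold]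
  | cons w ws ih =>
    by_cases h : PySem.Chars.startswith w.toList up.toList = true
    · cases best with
      | none => simp [pwBest, h, ih, minFold, pwStep]
      | some b =>
        by_cases hl : w.length < b.length <;>
          simp [pwBest, h, hl, ih, minFold, pwStep]
    · simp [pwBest, h, ih]

theorem minFold_some (b : String) (M : List String) : ∃ m, minFold (some b) M = some m := by
  induction M generalizing b with
  | nil => exact ⟨b, rfl⟩
  | cons w ws ih =>
    simp only [minFold, List.foldl_cons, pwStep]
    by_cases hl : w.length < b.length
    · simpa [minFold, hl] using ih w
    · simpa [minFold, hl] using ih b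

theorem minFold_eq_none_iff (M : List String) : minFold none M = none ↔ M = [] := by
  cases M with
  | nil => simp [minFold]
  | cons w ws =>
    simp only [minFold, List.foldl_cons, pwStep]
    obtain ⟨m, hm⟩ := minFold_some w ws
    simp only [minFold] at hm
    simp [hm]

theorem head?_insertBy (x : String) (s : List String) :
    (PySem.List.insertBy (fun a b => decide (PySem.Str.len a < PySem.Str.len b)) x s).head? =
      some (match s.head? with
            | none => x
            | some m => if PySem.Str.len x < PySem.Str.len m then x else m) := by
  cases s with
  | nil => simp [PySem.List.insertBy]
  | cons m t =>
    by_cases h : x.length < m.length <;> simp [PySem.List.insertBy, h]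

theorem sorted_head_eq_minFold (M : List String) :
    (PySem.List.sorted M (fun w => PySem.Str.len w) false).head? = minFold none M := by
  induction M using List.reverseRecOn with
  | nil => simp [PySem.List.sorted_eq_foldl_insertBy, minFold]
  | append_singleton xs x ih =>
    rw [PySem.List.sorted_eq_foldl_insertBy] at ih ⊢
    rw [List.foldl_append, minFold_append]
    simp only [List.foldl_cons, List.foldl_nil]
    rw [head?_insertBy, ← ih]
    cases hs : (List.foldl (fun acc y => PySem.List.insertBy (fun a b => decide (PySem.Str.len a < PySem.Str.len b)) y acc) [] xs).head? with
    | none => simp [pwStep]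
    | some m =>
      by_cases h : x.length < m.length <;> simp [pwStep, h]

-- ===== VERDICT (by name: the statement is the Claim_ definition above) =====
theorem predict_word_spec : Claim_equal_predict_word := by
  unfold Claim_equal_predict_word
  intro prefix_ _
  unfold Spec_predict_word predict_word predict_word_alt
  by_cases hlen : PySem.Str.len prefix_ < 2
  · rw [if_pos hlen, if_pos hlen]
  · rw [if_neg hlen, if_neg hlen, pwWords_eq, pwBest_eq_minFold]
    set M := WORD_VOCAB.filter (fun w => PySem.Str.startswith w (PySem.Str.upper prefix_)) with hM
    by_cases hne : M = []
    · rw [if_neg (by simp [hne])]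
      simp [hne, minFold]
    · rw [if_pos hne]
      cases hmf : minFold none M with
      | none => exact absurd ((minFold_eq_none_iff M).mp hmf) hne
      | some m =>
        have hhead := sorted_head_eq_minFold M
        rw [hmf, List.head?_eq_getElem?] at hhead
        rw [PySem.List.pyGet?_zero, hhead]
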